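-- pv_equiv track=rewrite | github.com/wang-bill/riscalar | superscalar/custom_assembler.py | sanitize_inst
-- ===== SOURCE A (Python) =====
-- def sanitize_inst(inst_type, inst_components):
--   '''
--   Sanitizes instruction (get rid of commas, spaces, etc.)
--   Extracts values from parantheses
--   '''
--   sanitized_inst = []
--   if inst_type == "R": # add a1, a1, a2 -> [add, a1, a1, a2]
--     for i in range(len(inst_components)):
--       if i == 1 or i == 2:
--         sanitized_inst.append(inst_components[i][:-1].strip()) # get rid of trailing comma
--       else:
--         sanitized_inst.append(inst_components[i].strip())
--
--   if inst_type == "I":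
--     inst_name = inst_components[0]
--     if inst_name in ["lb", "lh", "lw", "lbu", "lhu"]: # lw a1 40(x0) -> [lw, a1, 40, x0]
--       for i in range(len(inst_components)):
--         if i == 1:
--           sanitized_inst.append(inst_components[i][:-1].strip())
--         elif i == 2:
--           offset_rs1 = inst_components[2].split("(")
--           sanitized_inst.append(offset_rs1[0].strip())
--           sanitized_inst.append(offset_rs1[1][:-1].strip()) # get rid of parantheses
--         else:
--           sanitized_inst.append(inst_components[i].strip())
--     else: # addi a1, a1, 6 -> [addi, a1, a1, 6]
--       for i in range(len(inst_components)):
--         if i == 1 or i == 2: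
--           sanitized_inst.append(inst_components[i][:-1].strip()) # get rid of trailing comma
--         else:
--           sanitized_inst.append(inst_components[i].strip())
--
--   if inst_type == "S": # sw a2, 40(a1) -> [sw, a2, 40, a1]
--     for i in range(len(inst_components)):
--       if i == 1:
--         sanitized_inst.append(inst_components[i][:-1].strip())
--       elif i == 2:
--         offset_rs1 = inst_components[2].split("(")
--         sanitized_inst.append(offset_rs1[0].strip())
--         sanitized_inst.append(offset_rs1[1][:-1].strip()) # get rid of parantheses
--       else:
--         sanitized_inst.append(inst_components[i].strip())
--
--   if inst_type == "B": # beq a1, a2, 40 -> [beq, a1, a2, 40]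
--     for i in range(len(inst_components)):
--       if i == 1 or i == 2:
--         sanitized_inst.append(inst_components[i][:-1].strip()) # get rid of trailing comma
--       else:
--         sanitized_inst.append(inst_components[i].strip())
--
--   if inst_type == "J": # jal a1, 40 -> [jal, a1, 40]
--     for i in range(len(inst_components)):
--       if i == 1:
--         sanitized_inst.append(inst_components[i][:-1].strip()) # get rid of trailing comma
--       else:
--         sanitized_inst.append(inst_components[i].strip())
--
--   if inst_type == "U": # lui a1, 44 -> [lui, a1, 44]
--     for i in range(len(inst_components)):
--       if i == 1:
--         sanitized_inst.append(inst_components[i][:-1].strip()) # get rid of trailing comma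
--       else:
--         sanitized_inst.append(inst_components[i].strip())
--
--
--   assert len(sanitized_inst) == 3 or len(sanitized_inst) == 4, "Either your instruction: " + str(inst_components[0]) + " is wrong or sanitize_inst is implemented wrong"
--
--   return sanitized_inst
-- ===== SOURCE B (Python) =====
-- LOADS = ("lb", "lh", "lw", "lbu", "lhu")
--
-- # inst_type -> (indices whose trailing comma is dropped, optional paren-split index)
-- SPECS = {"R": ((1, 2), None), "B": ((1, 2), None), "S": ((1,), 2),
--          "J": ((1,), None), "U": ((1,), None)}
--
--
-- def sanitize_inst(inst_type, inst_components):
--     if inst_type == "I":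
--         spec = ((1,), 2) if inst_components[0] in LOADS else ((1, 2), None)
--     else:
--         spec = SPECS.get(inst_type)
--     if spec is None:
--         fields = []
--     else:
--         commas, paren = spec
--         # stage 1: drop trailing commas
--         fields = [t[:-1] if i in commas else t for i, t in enumerate(inst_components)]
--         # stage 2: splice the parenthesised token into (offset, rs1-without-')')
--         if paren is not None:
--             parts = inst_components[paren].split("(")
--             fields[paren:paren + 1] = [parts[0], parts[1][:-1]]
--     # stage 3: strip every field
--     sanitized_inst = [t.strip() for t in fields]
--     assert len(sanitized_inst) == 3 or len(sanitized_inst) == 4, "Either your instruction: " + str(inst_components[0]) + " is wrong or sanitize_inst is implemented wrong"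
--     return sanitized_inst
-- ===== Notes on version B (the rewrite author's own statement) =====
-- stated objective: simpler
-- what changed: Replaces A's six per-type index loops with interleaved branches by a table-selected spec and three staged passes: a comprehension that drops trailing commas, a single slice-assignment splice that expands the parenthesised token, and a final comprehension stripping every field.
import Mathlib
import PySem

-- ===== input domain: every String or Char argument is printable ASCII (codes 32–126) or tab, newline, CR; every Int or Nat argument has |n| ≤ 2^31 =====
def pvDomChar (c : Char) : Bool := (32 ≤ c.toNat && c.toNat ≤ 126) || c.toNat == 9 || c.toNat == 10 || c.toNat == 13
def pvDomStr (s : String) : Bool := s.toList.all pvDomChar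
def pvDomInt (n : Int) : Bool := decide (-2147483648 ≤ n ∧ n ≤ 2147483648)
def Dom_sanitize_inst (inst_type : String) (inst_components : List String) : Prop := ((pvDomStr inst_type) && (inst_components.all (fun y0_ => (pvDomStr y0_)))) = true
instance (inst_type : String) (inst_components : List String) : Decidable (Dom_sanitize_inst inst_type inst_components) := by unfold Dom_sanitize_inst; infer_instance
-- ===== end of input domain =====

-- B replaces A's six per-type loops with interleaved per-index branches by three staged passes
-- (comma-strip comprehension, one splice for the parenthesised token, final strip comprehension)
-- driven by a small dispatch table — simpler; equal on every input where A returns.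

-- ===== PORT A =====
-- s[:-1].strip()  (exact: PySem.Str.slice/strip)
def pvTrimComma (s : String) : String := PySem.Str.strip (PySem.Str.slice s none (some (-1)))

-- s.split("("): sep is nonempty so Python's split never raises; split? is some here
def pvSplitParen (s : String) : List String := (PySem.Str.split? s "(").getD []

-- inst_components[2].split("("): Pre_ guarantees '(' occurs, so parts[0]/parts[1] exist;
-- the getD defaults are never read on admitted inputs (Python raises IndexError there).
def sanitize_inst (inst_type : String) (inst_components : List String) : List String :=
  let s0 : List String := []
  let s1 := if inst_type = "R" then
      (List.range inst_components.length).foldl (fun acc i =>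
        if i = 1 ∨ i = 2 then acc ++ [pvTrimComma (inst_components.getD i "")]
        else acc ++ [PySem.Str.strip (inst_components.getD i "")]) s0
    else s0
  let s2 := if inst_type = "I" then
      let inst_name := inst_components.getD 0 ""   -- inst_components[0]; Pre_ gives the list nonempty here
      if inst_name = "lb" ∨ inst_name = "lh" ∨ inst_name = "lw" ∨ inst_name = "lbu" ∨ inst_name = "lhu" then
        (List.range inst_components.length).foldl (fun acc i =>
          if i = 1 then acc ++ [pvTrimComma (inst_components.getD i "")]
          else if i = 2 then
            let offset_rs1 := pvSplitParen (inst_components.getD 2 "")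
            acc ++ [PySem.Str.strip (offset_rs1.getD 0 "")] ++ [pvTrimComma (offset_rs1.getD 1 "")]
          else acc ++ [PySem.Str.strip (inst_components.getD i "")]) s1
      else
        (List.range inst_components.length).foldl (fun acc i =>
          if i = 1 ∨ i = 2 then acc ++ [pvTrimComma (inst_components.getD i "")]
          else acc ++ [PySem.Str.strip (inst_components.getD i "")]) s1
    else s1
  let s3 := if inst_type = "S" then
      (List.range inst_components.length).foldl (fun acc i =>
        if i = 1 then acc ++ [pvTrimComma (inst_components.getD i "")]
        else if i = 2 then
          let offset_rs1 := pvSplitParen (inst_components.getD 2 "")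
          acc ++ [PySem.Str.strip (offset_rs1.getD 0 "")] ++ [pvTrimComma (offset_rs1.getD 1 "")]
        else acc ++ [PySem.Str.strip (inst_components.getD i "")]) s2
    else s2
  let s4 := if inst_type = "B" then
      (List.range inst_components.length).foldl (fun acc i =>
        if i = 1 ∨ i = 2 then acc ++ [pvTrimComma (inst_components.getD i "")]
        else acc ++ [PySem.Str.strip (inst_components.getD i "")]) s3
    else s3
  let s5 := if inst_type = "J" then
      (List.range inst_components.length).foldl (fun acc i =>
        if i = 1 then acc ++ [pvTrimComma (inst_components.getD i "")]
        else acc ++ [PySem.Str.strip (inst_components.getD i "")]) s4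
    else s4
  let s6 := if inst_type = "U" then
      (List.range inst_components.length).foldl (fun acc i =>
        if i = 1 then acc ++ [pvTrimComma (inst_components.getD i "")]
        else acc ++ [PySem.Str.strip (inst_components.getD i "")]) s5
    else s5
  -- assert len ∈ {3,4}: holds on every input admitted by Pre_ (A raises otherwise)
  s6

-- ===== PORT B =====
def pvLoads : List String := ["lb", "lh", "lw", "lbu", "lhu"]

-- SPECS dispatch table: inst_type ↦ (comma-strip indices, optional paren-split index);
-- the paren index is the Python literal 2 (nonnegative), so it is a Nat here.
def pvSpecs : PySem.Dict String (List Int × Option Nat) :=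
  PySem.Dict.ofList [("R", ([1, 2], none)), ("B", ([1, 2], none)), ("S", ([1], some 2)),
                     ("J", ([1], none)), ("U", ([1], none))]

def sanitize_inst_alt (inst_type : String) (inst_components : List String) : List String :=
  let spec : Option (List Int × Option Nat) :=
    if inst_type = "I" then
      some (if inst_components.getD 0 "" ∈ pvLoads then ([1], some 2) else ([1, 2], none))
    else pvSpecs.get? inst_type
  let fields : List String :=
    match spec with
    | none => []   -- the assert then raises in Python; Pre_ admits no such input
    | some (commas, paren) =>
      -- stage 1: comma-strip comprehension over enumerate
      let fields := (PySem.List.enumerate inst_components).map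
        (fun p => if p.1 ∈ commas then PySem.Str.slice p.2 none (some (-1)) else p.2)
      -- stage 2: fields[p:p+1] = [parts[0], parts[1][:-1]]; splice assignment at a
      -- nonnegative literal index is exactly take/++/drop. inst_components[p] is in
      -- range on every input Pre_ admits (Python raises IndexError otherwise).
      match paren with
      | none => fields
      | some p =>
        let parts := pvSplitParen (inst_components.getD p "")
        fields.take p ++ [parts.getD 0 "", PySem.Str.slice (parts.getD 1 "") none (some (-1))]
          ++ fields.drop (p + 1)
  -- stage 3: strip every field
  fields.map PySem.Str.strip

-- ===== PRECONDITION & SPEC =====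
-- Pre_ = exactly the inputs where the Python A returns normally: a known inst_type, a token count
-- giving a result of length 3 or 4 (otherwise AssertionError, or IndexError on inst_components[0]
-- for "I" with an empty list), and a '(' in the third token of load/S instructions (otherwise
-- IndexError on split(...)[1]).
def Pre_sanitize_inst (inst_type : String) (inst_components : List String) : Prop :=
  ((inst_type = "R" ∨ inst_type = "B" ∨ inst_type = "J" ∨ inst_type = "U") ∧
      (inst_components.length = 3 ∨ inst_components.length = 4)) ∨
  (inst_type = "I" ∧ inst_components.getD 0 "" ∈ pvLoads ∧
      inst_components.length = 3 ∧ '(' ∈ (inst_components.getD 2 "").toList) ∨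
  (inst_type = "I" ∧ inst_components.getD 0 "" ∉ pvLoads ∧
      (inst_components.length = 3 ∨ inst_components.length = 4)) ∨
  (inst_type = "S" ∧ inst_components.length = 3 ∧ '(' ∈ (inst_components.getD 2 "").toList)

instance (inst_type : String) (inst_components : List String) : Decidable (Pre_sanitize_inst inst_type inst_components) := by unfold Pre_sanitize_inst; infer_instance

def pvWitness_sanitize_inst : String × List String := ("S", ["sw", "a2,", "40(a1)"])

def Spec_sanitize_inst (inst_type : String) (inst_components : List String) (out : List String) : Prop := out = sanitize_inst_alt inst_type inst_components
instance (inst_type : String) (inst_components : List String) (out : List String) : Decidable (Spec_sanitize_inst inst_type inst_components out) := by unfold Spec_sanitize_inst; infer_instance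

-- ===== CLAIM =====
def Claim_equal_sanitize_inst : Prop := ∀ (inst_type : String) (inst_components : List String), Dom_sanitize_inst inst_type inst_components → Pre_sanitize_inst inst_type inst_components → Spec_sanitize_inst inst_type inst_components (sanitize_inst inst_type inst_components)

-- ===== LEMMAS AND PROOFS =====

lemma pv_len4 {α : Type} (c : List α) (h : c.length = 4) : ∃ a b x d, c = [a, b, x, d] := by
  rcases c with _ | ⟨a, _ | ⟨b, _ | ⟨x, _ | ⟨d, _ | ⟨e, tl⟩⟩⟩⟩⟩ <;> simp_all

lemma pv_eq_RBJU3 (t a b x : String) (ht : t = "R" ∨ t = "B" ∨ t = "J" ∨ t = "U") :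
    sanitize_inst t [a, b, x] = sanitize_inst_alt t [a, b, x] := by
  rcases ht with rfl | rfl | rfl | rfl <;> rfl

lemma pv_eq_RBJU4 (t a b x d : String) (ht : t = "R" ∨ t = "B" ∨ t = "J" ∨ t = "U") :
    sanitize_inst t [a, b, x, d] = sanitize_inst_alt t [a, b, x, d] := by
  rcases ht with rfl | rfl | rfl | rfl <;> rfl

lemma pv_eq_S3 (a b x : String) : sanitize_inst "S" [a, b, x] = sanitize_inst_alt "S" [a, b, x] := rfl

lemma pv_eq_Iload3 (a b x : String) (h : a ∈ pvLoads) :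
    sanitize_inst "I" [a, b, x] = sanitize_inst_alt "I" [a, b, x] := by
  have h' := h
  simp only [pvLoads, List.mem_cons, List.not_mem_nil, or_false] at h'
  simp [sanitize_inst, sanitize_inst_alt, h, h', pvTrimComma, PySem.List.enumerate, List.range_succ]

lemma pv_nonload_hyps (a : String) (h : a ∉ pvLoads) :
    a ≠ "lb" ∧ a ≠ "lh" ∧ a ≠ "lw" ∧ a ≠ "lbu" ∧ a ≠ "lhu" := by
  simp only [pvLoads, List.mem_cons, List.not_mem_nil, or_false, not_or] at h
  exact h

lemma pv_eq_Inonload3 (a b x : String) (h : a ∉ pvLoads) :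
    sanitize_inst "I" [a, b, x] = sanitize_inst_alt "I" [a, b, x] := by
  obtain ⟨h1, h2, h3, h4, h5⟩ := pv_nonload_hyps a h
  simp [sanitize_inst, sanitize_inst_alt, h, h1, h2, h3, h4, h5, pvTrimComma,
    PySem.List.enumerate, List.range_succ]

lemma pv_eq_Inonload4 (a b x d : String) (h : a ∉ pvLoads) :
    sanitize_inst "I" [a, b, x, d] = sanitize_inst_alt "I" [a, b, x, d] := by
  obtain ⟨h1, h2, h3, h4, h5⟩ := pv_nonload_hyps a h
  simp [sanitize_inst, sanitize_inst_alt, h, h1, h2, h3, h4, h5, pvTrimComma,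
    PySem.List.enumerate, List.range_succ]

-- ===== VERDICT =====
theorem sanitize_inst_spec : Claim_equal_sanitize_inst := by
  intro t c _ hpre
  unfold Spec_sanitize_inst
  rcases hpre with ⟨ht, hlen⟩ | ⟨rfl, hmem, h3, -⟩ | ⟨rfl, hmem, hlen⟩ | ⟨rfl, h3, -⟩
  · rcases hlen with h3 | h4
    · obtain ⟨a, b, x, rfl⟩ := List.length_eq_three.mp h3
      exact pv_eq_RBJU3 t a b x ht
    · obtain ⟨a, b, x, d, rfl⟩ := pv_len4 c h4
      exact pv_eq_RBJU4 t a b x d ht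
  · obtain ⟨a, b, x, rfl⟩ := List.length_eq_three.mp h3
    exact pv_eq_Iload3 a b x (by simpa using hmem)
  · rcases hlen with h3 | h4
    · obtain ⟨a, b, x, rfl⟩ := List.length_eq_three.mp h3
      exact pv_eq_Inonload3 a b x (by simpa using hmem)
    · obtain ⟨a, b, x, d, rfl⟩ := pv_len4 c h4
      exact pv_eq_Inonload4 a b x d (by simpa using hmem)
  · obtain ⟨a, b, x, rfl⟩ := List.length_eq_three.mp h3
    exact pv_eq_S3 a b x
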